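-- pv_equiv track=rewrite | github.com/jasunchen/agmonitor_backend | opt/testday.py | reconstructFilter
-- ===== SOURCE A (Python) =====
-- def reconstructFilter(filteredFlex):
--     returnArr = []
--     tempArr = []
--     for i in filteredFlex:
--         if i == 0:
--             if tempArr:
--                 returnArr.append(tempArr)
--                 tempArr = []
--         else:
--             tempArr.append(i)
--     return returnArr
-- ===== SOURCE B (Python) =====
-- def reconstructFilter(filteredFlex):
--     runs = []
--     rest = filteredFlex
--     while 0 in rest:
--         k = rest.index(0)
--         head = rest[:k]
--         if head:
--             runs.append(head)
--         rest = rest[k + 1:]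
--     return runs
-- ===== Notes on version B (the rewrite author's own statement) =====
-- stated objective: alternative
-- what changed: Replaces A's single element-by-element accumulator loop with a recursive decomposition that finds the first zero with index(), slices off the run before it, and recurses on the remainder after it (the trailing zero-free run falls in the no-zero base case and is dropped, as in A).
import Mathlib
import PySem

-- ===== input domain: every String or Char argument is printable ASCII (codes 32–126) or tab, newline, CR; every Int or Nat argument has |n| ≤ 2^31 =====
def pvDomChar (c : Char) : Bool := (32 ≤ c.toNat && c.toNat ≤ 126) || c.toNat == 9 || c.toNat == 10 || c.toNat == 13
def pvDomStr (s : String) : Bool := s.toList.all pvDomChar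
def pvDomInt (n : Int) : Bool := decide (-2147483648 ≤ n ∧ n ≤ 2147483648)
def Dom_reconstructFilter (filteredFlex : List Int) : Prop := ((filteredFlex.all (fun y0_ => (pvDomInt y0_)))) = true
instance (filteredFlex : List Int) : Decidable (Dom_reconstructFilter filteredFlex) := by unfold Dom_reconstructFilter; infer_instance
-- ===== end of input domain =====

-- B: recursive split at the first zero (index/slice decomposition) instead of A's element-by-element accumulator loop; same values, same cost (objective: alternative).

-- ===== PORT A =====
-- loop over filteredFlex carrying (returnArr, tempArr)
def reconstructFilterLoop : List Int → List (List Int) → List Int → List (List Int)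
  | [], returnArr, _ => returnArr
  | i :: rest, returnArr, tempArr =>
    if i = 0 then
      if tempArr ≠ [] then reconstructFilterLoop rest (returnArr ++ [tempArr]) []
      else reconstructFilterLoop rest returnArr tempArr
    else reconstructFilterLoop rest returnArr (tempArr ++ [i])

def reconstructFilter (filteredFlex : List Int) : List (List Int) :=
  reconstructFilterLoop filteredFlex [] []

-- ===== PORT B =====
-- while-loop over (runs, rest); slices rest[:k] / rest[k+1:] with 0 <= k < len(rest) are exactly List.take k / List.drop (k+1)
def reconstructFilterAltLoop (runs : List (List Int)) (rest : List Int) : List (List Int) :=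
  match h : PySem.List.index? rest 0 with   -- `0 in rest` test and `rest.index(0)` combined: none = loop exits
  | none => runs
  | some k =>
    let head := rest.take k
    reconstructFilterAltLoop (if head ≠ [] then runs ++ [head] else runs) (rest.drop (k + 1))
termination_by rest.length
decreasing_by
  obtain ⟨hk, -, -⟩ := PySem.List.getElem_of_index?_eq_some h
  simp; omega

def reconstructFilter_alt (filteredFlex : List Int) : List (List Int) :=
  reconstructFilterAltLoop [] filteredFlex

-- ===== PRECONDITION & SPEC =====
def Spec_reconstructFilter (filteredFlex : List Int) (out : List (List Int)) : Prop := out = reconstructFilter_alt filteredFlex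
instance (filteredFlex : List Int) (out : List (List Int)) : Decidable (Spec_reconstructFilter filteredFlex out) := by unfold Spec_reconstructFilter; infer_instance

-- ===== CLAIM (what is proved, stated in full; the proofs are below) =====
def Claim_equal_reconstructFilter : Prop := ∀ (filteredFlex : List Int), Dom_reconstructFilter filteredFlex → Spec_reconstructFilter filteredFlex (reconstructFilter filteredFlex)

-- ===== LEMMAS AND PROOFS =====



-- proof-only recursive characterisation of B's loop
def altSpec (l : List Int) : List (List Int) :=
  match h : PySem.List.index? l 0 with
  | none => []
  | some k => (if l.take k ≠ [] then [l.take k] else []) ++ altSpec (l.drop (k + 1))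
termination_by l.length
decreasing_by
  obtain ⟨hk, -, -⟩ := PySem.List.getElem_of_index?_eq_some h
  simp; omega

theorem altLoop_acc (rest : List Int) : ∀ runs,
    reconstructFilterAltLoop runs rest = runs ++ altSpec rest := by
  induction rest using altSpec.induct with
  | case1 l h =>
    intro runs
    rw [reconstructFilterAltLoop, altSpec]
    split
    · simp
    · next k h' => rw [h] at h'; exact absurd h' (by simp)
  | case2 l k h ih =>
    intro runs
    rw [reconstructFilterAltLoop, altSpec]
    split
    · next h' => rw [h] at h'; exact absurd h' (by simp)
    · next k' h' =>
      rw [h] at h'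
      injection h' with hk
      subst hk
      rw [ih]
      by_cases ht : l.take k = [] <;> simp [ht]

theorem alt_no_zero (l : List Int) (h : (0:Int) ∉ l) : altSpec l = [] := by
  rw [altSpec]
  split
  · rfl
  · next k h' =>
    exact absurd ((PySem.List.index?_isSome_iff l 0).1 (h' ▸ rfl)) h

theorem alt_zero_split (temp t : List Int) (h : (0:Int) ∉ temp) :
    altSpec (temp ++ 0 :: t) =
      (if temp ≠ [] then [temp] else []) ++ altSpec t := by
  have hidx : PySem.List.index? (temp ++ 0 :: t) 0 = some temp.length := by
    rw [PySem.List.index?_eq_some_iff]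
    exact ⟨temp, t, rfl, rfl, h⟩
  rw [altSpec]
  split
  · next h' => rw [hidx] at h'; exact absurd h' (by simp)
  · next k h' =>
    rw [hidx] at h'
    obtain rfl : k = temp.length := (Option.some.inj h').symm
    have h1 : (temp ++ 0 :: t).take temp.length = temp := by
      simp
    have h2 : (temp ++ 0 :: t).drop (temp.length + 1) = t := by
      have he : temp ++ 0 :: t = (temp ++ [0]) ++ t := by simp
      rw [he]
      simp
    simp only [h1, h2]

theorem loop_eq (xs : List Int) : ∀ ret temp, (0:Int) ∉ temp →
    reconstructFilterLoop xs ret temp = ret ++ altSpec (temp ++ xs) := by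
  induction xs with
  | nil =>
    intro ret temp h
    simp [reconstructFilterLoop, alt_no_zero _ (by simpa using h)]
  | cons i rest ih =>
    intro ret temp h
    by_cases hz : i = 0
    · subst hz
      rw [alt_zero_split _ _ h]
      by_cases ht : temp = []
      · subst ht; simp [reconstructFilterLoop, ih ret [] (by simp)]
      · simp only [reconstructFilterLoop, if_pos ht, ih _ [] (by simp)]
        simp
    · simp only [reconstructFilterLoop, if_neg hz, ih ret (temp ++ [i]) (by simp [h, Ne.symm hz])]
      simp

theorem reconstructFilter_spec : Claim_equal_reconstructFilter := by
  intro xs _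
  unfold Spec_reconstructFilter reconstructFilter reconstructFilter_alt
  rw [altLoop_acc]
  simpa using loop_eq xs [] [] (by simp)
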